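-- pv_equiv track=rewrite | github.com/eliottcassidy2000/math | 04-computation/alpha3_p7_only.py | enumerate_directed_cycles
-- ===== SOURCE A (Python) =====
-- from itertools import combinations
--
-- def enumerate_directed_cycles(A, p):
--     cycles = []
--     for k in range(3, p + 1, 2):
--         for subset in combinations(range(p), k):
--             verts = list(subset)
--             n_cyc = count_ham_cycles(A, verts)
--             for _ in range(n_cyc):
--                 cycles.append(frozenset(subset))
--     return cycles
--
-- def count_ham_cycles(A, verts):
--     k = len(verts)
--     if k == 3:
--         a, b, c = verts
--         return (A[a][b]*A[b][c]*A[c][a]) + (A[a][c]*A[c][b]*A[b][a])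
--     start = 0
--     dp = {(1 << start, start): 1}
--     for mask in range(1, 1 << k):
--         if not (mask & (1 << start)):
--             continue
--         for v in range(k):
--             if not (mask & (1 << v)):
--                 continue
--             key = (mask, v)
--             if key not in dp or dp[key] == 0:
--                 continue
--             cnt = dp[key]
--             for w in range(k):
--                 if mask & (1 << w):
--                     continue
--                 if A[verts[v]][verts[w]]:
--                     nkey = (mask | (1 << w), w)
--                     dp[nkey] = dp.get(nkey, 0) + cnt
--     full = (1 << k) - 1
--     total = 0
--     for v in range(k):
--         if v == start:
--             continue
--         key = (full, v)
--         if key in dp and dp[key] > 0: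
--             if A[verts[v]][verts[start]]:
--                 total += dp[key]
--     return total
-- ===== SOURCE B (Python) =====
-- from itertools import combinations
--
-- def enumerate_directed_cycles(A, p):
--     cycles = []
--     for k in range(3, p + 1, 2):
--         for subset in combinations(range(p), k):
--             verts = list(subset)
--             if k == 3:
--                 a, b, c = verts
--                 n = A[a][b]*A[b][c]*A[c][a] + A[a][c]*A[c][b]*A[b][a]
--             else:
--                 n = _count_cycles_from(A, verts, 0, list(range(1, k)))
--             cycles.extend([frozenset(subset)] * n)
--     return cycles
--
-- def _count_cycles_from(A, verts, v, remaining):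
--     if not remaining:
--         return 1 if A[verts[v]][verts[0]] else 0
--     total = 0
--     for w in remaining:
--         if A[verts[v]][verts[w]]:
--             total += _count_cycles_from(A, verts, w, [x for x in remaining if x != w])
--     return total
-- ===== Notes on version B (the rewrite author's own statement) =====
-- stated objective: simpler
-- what changed: Replaced the Held-Karp bitmask-dictionary DP in count_ham_cycles with a direct recursive backtracking count of Hamiltonian cycles from the fixed start vertex; the k==3 branch keeps A's closed form since there the multiplicity is the product of the actual matrix entries, not an edge-existence count.
-- outside the precondition, e.g. on enumerate_directed_cycles([[0, 0, 0], [0, 0, 0], [0, 0]], 3): A returns [], B returns []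
import Mathlib
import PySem

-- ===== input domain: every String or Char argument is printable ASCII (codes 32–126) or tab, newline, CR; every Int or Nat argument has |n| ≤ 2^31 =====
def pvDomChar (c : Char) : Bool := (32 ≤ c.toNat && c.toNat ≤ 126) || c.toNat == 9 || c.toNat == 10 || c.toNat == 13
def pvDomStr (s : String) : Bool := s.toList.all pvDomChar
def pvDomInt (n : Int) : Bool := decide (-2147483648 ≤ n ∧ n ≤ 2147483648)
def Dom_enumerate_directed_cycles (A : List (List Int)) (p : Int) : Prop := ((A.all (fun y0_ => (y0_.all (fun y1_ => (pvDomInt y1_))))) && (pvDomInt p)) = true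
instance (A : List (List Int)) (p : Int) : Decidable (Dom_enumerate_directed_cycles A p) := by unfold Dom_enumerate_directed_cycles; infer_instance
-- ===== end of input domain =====

-- B replaces the Held–Karp bitmask-dictionary DP of count_ham_cycles with a direct recursive
-- backtracking count from the fixed start vertex (objective: simpler); the k==3 closed form is
-- A's own definition of the multiplicity (products of actual entries) and is kept in both.

-- ===== PORT A =====
-- A[i][j] (exact wherever Python does not raise; Pre_ excludes the raising inputs)
def pvEntry (A : List (List Int)) (i j : Int) : Int :=
  PySem.List.pyGetD (PySem.List.pyGetD A i []) j 0

-- truthiness test `if A[verts[v]][verts[w]]:` for positions v w in verts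
def pvE (A : List (List Int)) (verts : List Int) (u w : Nat) : Bool :=
  pvEntry A (verts.getD u 0) (verts.getD w 0) != 0

-- inner `for w in range(k)` body of the DP
def pvWStep (e : Nat → Nat → Bool) (mask v : Nat) (cnt : Int)
    (d : PySem.Dict (Nat × Nat) Int) (w : Nat) : PySem.Dict (Nat × Nat) Int :=
  if mask.testBit w then d
  else if e v w then
    d.insert (mask ||| 2 ^ w, w) (d.getD (mask ||| 2 ^ w, w) 0 + cnt)
  else d

-- `for v in range(k)` body of the DP (reads cnt = dp[(mask, v)], skips absent/zero)
def pvVStep (e : Nat → Nat → Bool) (mask k : Nat)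
    (d : PySem.Dict (Nat × Nat) Int) (v : Nat) : PySem.Dict (Nat × Nat) Int :=
  if mask.testBit v then
    match d.get? (mask, v) with
    | none => d
    | some cnt => if cnt = 0 then d else (List.range k).foldl (pvWStep e mask v cnt) d
  else d

-- `for mask in range(1, 1 << k)` body
def pvMaskStep (e : Nat → Nat → Bool) (k : Nat)
    (d : PySem.Dict (Nat × Nat) Int) (mask : Nat) : PySem.Dict (Nat × Nat) Int :=
  if mask.testBit 0 then (List.range k).foldl (pvVStep e mask k) d else d

def count_ham_cycles (A : List (List Int)) (verts : List Int) : Int :=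
  let k := verts.length
  if k = 3 then
    match verts with
    | [a, b, c] =>
        pvEntry A a b * pvEntry A b c * pvEntry A c a
          + pvEntry A a c * pvEntry A c b * pvEntry A b a
    | _ => 0
  else
    let e := pvE A verts
    let start : Nat := 0
    let d0 : PySem.Dict (Nat × Nat) Int := PySem.Dict.empty.insert (2 ^ start, start) 1
    let d := (List.range' 1 (2 ^ k - 1)).foldl (pvMaskStep e k) d0
    let full := 2 ^ k - 1
    (List.range k).foldl (fun t v =>
      if v = start then t
      else
        match d.get? (full, v) with
        | none => t
        | some x => if 0 < x then (if e v start then t + x else t) else t) 0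

def enumerate_directed_cycles (A : List (List Int)) (p : Int) : List (List Int) :=
  (PySem.List.pyRange 3 (p + 1) 2).foldl (fun cycles k =>
    (PySem.List.combinations (PySem.List.pyRange 0 p 1) k.toNat).foldl (fun cycles subset =>
      cycles ++ List.replicate (count_ham_cycles A subset).toNat (PySem.Set.ofList subset)) cycles) []

-- ===== PORT B =====
-- recursive backtracking count of Hamiltonian cycles from `verts[v]` through `remaining` back to verts[0]
-- termination of the backtracking recursion: the filtered remainder is strictly shorter
lemma pv_filter_ne_lt (S : List Nat) (w : Nat) (hw : w ∈ S) :
    (S.filter (fun x => decide (x ≠ w))).length < S.length :=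
  List.length_filter_lt_length_iff_exists.mpr ⟨w, hw, by simp⟩

def pvDfs (e : Nat → Nat → Bool) (v : Nat) (remaining : List Nat) : Int :=
  if remaining.isEmpty then (if e v 0 then 1 else 0)
  else
    remaining.attach.foldl (fun t w =>
      if e v w.1 then t + pvDfs e w.1 (remaining.filter (fun x => decide (x ≠ w.1))) else t) 0
termination_by remaining.length
decreasing_by
  rw [List.filter_attach remaining (fun x => decide (x ≠ w.1))]; simpa using pv_filter_ne_lt remaining w.1 w.2

def pvCountAlt (A : List (List Int)) (verts : List Int) : Int :=
  let k := verts.length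
  if k = 3 then
    match verts with
    | [a, b, c] =>
        pvEntry A a b * pvEntry A b c * pvEntry A c a
          + pvEntry A a c * pvEntry A c b * pvEntry A b a
    | _ => 0
  else pvDfs (pvE A verts) 0 (List.range' 1 (k - 1))

def enumerate_directed_cycles_alt (A : List (List Int)) (p : Int) : List (List Int) :=
  (PySem.List.pyRange 3 (p + 1) 2).foldl (fun cycles k =>
    (PySem.List.combinations (PySem.List.pyRange 0 p 1) k.toNat).foldl (fun cycles subset =>
      cycles ++ List.replicate (pvCountAlt A subset).toNat (PySem.Set.ofList subset)) cycles) []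

-- ===== PRECONDITION & SPEC =====
-- Pre_ excludes the inputs on which Python A raises IndexError: for p ≥ 3 it demands the first p
-- rows to exist with length ≥ p.  This is marginally stronger than necessary: Python raises only
-- when an out-of-range entry is actually READ, and e.g. a short last row (only columns < p-1 are
-- read from it) or entries unreachable because the DP pruned may leave A returning normally.
def Pre_enumerate_directed_cycles (A : List (List Int)) (p : Int) : Prop :=
  p ≤ 2 ∨ ((p : Int) ≤ A.length ∧ ∀ row ∈ A.take p.toNat, (p : Int) ≤ row.length)
instance (A : List (List Int)) (p : Int) : Decidable (Pre_enumerate_directed_cycles A p) := by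
  unfold Pre_enumerate_directed_cycles; infer_instance

def pvWitness_enumerate_directed_cycles : List (List Int) × Int :=
  ([[0, 1, 0], [0, 0, 1], [1, 0, 0]], 3)

def Spec_enumerate_directed_cycles (A : List (List Int)) (p : Int) (out : List (List Int)) : Prop := out = enumerate_directed_cycles_alt A p
instance (A : List (List Int)) (p : Int) (out : List (List Int)) : Decidable (Spec_enumerate_directed_cycles A p out) := by unfold Spec_enumerate_directed_cycles; infer_instance

-- ===== CLAIM (what is proved, stated in full; the proofs are below) =====
def Claim_equal_enumerate_directed_cycles : Prop := ∀ (A : List (List Int)) (p : Int), Dom_enumerate_directed_cycles A p → Pre_enumerate_directed_cycles A p → Spec_enumerate_directed_cycles A p (enumerate_directed_cycles A p)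

-- ===== LEMMAS AND PROOFS =====

-- clearing a set bit decreases the number
lemma pv_xor_pow_lt (m v : Nat) (h : m.testBit v = true) : m ^^^ 2 ^ v < m := by
  apply Nat.lt_of_testBit v
  · simp [Nat.testBit_xor, h, Nat.testBit_two_pow]
  · exact h
  · intro j hj
    have : v ≠ j := Nat.ne_of_lt hj
    simp [Nat.testBit_xor, Nat.testBit_two_pow, this]

lemma pv_xor_cancel (a w : Nat) : (a ^^^ 2 ^ w) ^^^ 2 ^ w = a := by
  rw [Nat.xor_assoc, Nat.xor_self, Nat.xor_zero]

lemma pv_or_eq_xor (a w : Nat) (h : a.testBit w = false) : a ||| 2 ^ w = a ^^^ 2 ^ w := by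
  apply Nat.eq_of_testBit_eq
  intro i
  simp only [Nat.testBit_or, Nat.testBit_xor, Nat.testBit_two_pow]
  by_cases hi : w = i
  · subst hi; simp [h]
  · simp [hi]

lemma pv_sum_range (k : Nat) (f : Nat → Int) :
    ((List.range k).map f).sum = ∑ u ∈ Finset.range k, f u := by
  rw [← List.toFinset_range, List.sum_toFinset _ List.nodup_range]

-- number of edge-respecting orderings of the vertices of mask m that start at s and end at v
def pvF (e : Nat → Nat → Bool) (k s : Nat) (m : Nat) (v : Nat) : Int :=
  if hm : m.testBit v = true ∧ m.testBit s = true then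
    if v = s then (if m = 2 ^ s then 1 else 0)
    else
      ∑ u ∈ Finset.range k,
        (if (m ^^^ 2 ^ v).testBit u = true ∧ e u v = true then pvF e k s (m ^^^ 2 ^ v) u else 0)
  else 0
termination_by m
decreasing_by exact pv_xor_pow_lt m v hm.1

lemma pvF_zero_left (e : Nat → Nat → Bool) (k s m v : Nat) (h : m.testBit v = false) :
    pvF e k s m v = 0 := by
  rw [pvF]; simp [h]

lemma pvF_zero_s (e : Nat → Nat → Bool) (k s m v : Nat) (h : m.testBit s = false) :
    pvF e k s m v = 0 := by
  rw [pvF]; simp [h]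

lemma pvF_diag (e : Nat → Nat → Bool) (k s m : Nat) (h : m.testBit s = true) :
    pvF e k s m s = if m = 2 ^ s then 1 else 0 := by
  rw [pvF, dif_pos ⟨h, h⟩, if_pos rfl]

lemma pvF_step (e : Nat → Nat → Bool) (k s m v : Nat) (hv : m.testBit v = true)
    (hs : m.testBit s = true) (hvs : v ≠ s) :
    pvF e k s m v =
      ∑ u ∈ Finset.range k,
        (if (m ^^^ 2 ^ v).testBit u = true ∧ e u v = true then pvF e k s (m ^^^ 2 ^ v) u else 0) := by
  rw [pvF, dif_pos ⟨hv, hs⟩, if_neg hvs]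

lemma pvF_nonneg (e : Nat → Nat → Bool) (k s : Nat) : ∀ m v, 0 ≤ pvF e k s m v := by
  intro m
  induction m using Nat.strong_induction_on with
  | _ m ih =>
    intro v
    rw [pvF]
    split
    · rename_i hm
      split
      · split <;> simp
      · apply Finset.sum_nonneg
        intro u _
        split
        · exact ih _ (pv_xor_pow_lt m v hm.1) u
        · simp
    · simp

-- the first-step expansion of pvF (paths from s decomposed by their first edge)
lemma pvF_first_step (e : Nat → Nat → Bool) (k : Nat) :
    ∀ (m s u : Nat), s < k → u < k → m.testBit s = true → m ≠ 2 ^ s →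
      pvF e k s m u =
        ∑ w ∈ Finset.range k,
          (if (m ^^^ 2 ^ s).testBit w = true ∧ e s w = true then pvF e k w (m ^^^ 2 ^ s) u else 0) := by
  intro m
  induction m using Nat.strong_induction_on with
  | _ m ih =>
    intro s u hs hu hms hm2s
    by_cases hus : u = s
    · subst hus
      rw [pvF_diag e k u m hms, if_neg hm2s]
      symm
      apply Finset.sum_eq_zero
      intro w _
      split
      · exact pvF_zero_left e k w (m ^^^ 2 ^ u) u
          (by simp [Nat.testBit_xor, hms, Nat.testBit_two_pow])
      · rfl
    · have hsu : s ≠ u := fun h => hus h.symm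
      by_cases hmu : m.testBit u = true
      · -- main case
        have hm1s : (m ^^^ 2 ^ u).testBit s = true := by
          simp [Nat.testBit_xor, hms, Nat.testBit_two_pow, hus]
        have hm3u : (m ^^^ 2 ^ s).testBit u = true := by
          simp [Nat.testBit_xor, hmu, Nat.testBit_two_pow, hsu]
        have hm2sb : (m ^^^ 2 ^ u ^^^ 2 ^ s).testBit s = false := by
          simp [Nat.testBit_xor, hms, Nat.testBit_two_pow, hus]
        have hm2ub : (m ^^^ 2 ^ u ^^^ 2 ^ s).testBit u = false := by
          simp [Nat.testBit_xor, hmu, Nat.testBit_two_pow, hsu]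
        have hm32 : (m ^^^ 2 ^ s) ^^^ 2 ^ u = m ^^^ 2 ^ u ^^^ 2 ^ s := by
          rw [Nat.xor_assoc, Nat.xor_assoc, Nat.xor_comm (2 ^ s)]
        rw [pvF_step e k s m u hmu hms hus]
        by_cases hcase : m ^^^ 2 ^ u = 2 ^ s
        · -- two-element mask: both sides are (if e s u then 1 else 0)
          have hm3 : m ^^^ 2 ^ s = 2 ^ u := by
            have hm' : m = 2 ^ s ^^^ 2 ^ u := by
              rw [← hcase]; exact (pv_xor_cancel m u).symm
            rw [hm', Nat.xor_comm (2 ^ s) (2 ^ u), pv_xor_cancel]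
          rw [hcase, hm3]
          rw [Finset.sum_eq_single_of_mem s (Finset.mem_range.mpr hs)
            (by intro b _ hb; rw [if_neg]; rintro ⟨h1, -⟩
                rw [Nat.testBit_two_pow] at h1; simp at h1; exact hb h1.symm)]
          rw [Finset.sum_eq_single_of_mem u (Finset.mem_range.mpr hu)
            (by intro b _ hb; rw [if_neg]; rintro ⟨h1, -⟩
                rw [Nat.testBit_two_pow] at h1; simp at h1; exact hb h1.symm)]
          have h1 : pvF e k s (2 ^ s) s = 1 := by
            rw [pvF_diag e k s _ (by simp [Nat.testBit_two_pow]), if_pos rfl]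
          have h2 : pvF e k u (2 ^ u) u = 1 := by
            rw [pvF_diag e k u _ (by simp [Nat.testBit_two_pow]), if_pos rfl]
          simp [Nat.testBit_two_pow, h1, h2]
        · -- general case: expand both sides one more level and swap the sums
          have hL : ∀ x ∈ Finset.range k,
              (if (m ^^^ 2 ^ u).testBit x = true ∧ e x u = true
                then pvF e k s (m ^^^ 2 ^ u) x else 0) =
              ∑ w ∈ Finset.range k,
                (if (m ^^^ 2 ^ u).testBit x = true ∧ e x u = true then
                  (if (m ^^^ 2 ^ u ^^^ 2 ^ s).testBit w = true ∧ e s w = true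
                    then pvF e k w (m ^^^ 2 ^ u ^^^ 2 ^ s) x else 0) else 0) := by
            intro x hx
            by_cases hg : (m ^^^ 2 ^ u).testBit x = true ∧ e x u = true
            · simp only [if_pos hg]
              by_cases hxs : x = s
              · subst hxs
                rw [pvF_diag e k x _ hm1s, if_neg hcase]
                symm
                apply Finset.sum_eq_zero
                intro w _
                split
                · exact pvF_zero_left e k w _ x hm2sb
                · rfl
              · exact ih (m ^^^ 2 ^ u) (pv_xor_pow_lt m u hmu) s x hs
                  (Finset.mem_range.mp hx) hm1s hcase
            · simp only [if_neg hg]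
              symm
              exact Finset.sum_eq_zero (fun w _ => rfl)
          have hR : ∀ w ∈ Finset.range k,
              (if (m ^^^ 2 ^ s).testBit w = true ∧ e s w = true
                then pvF e k w (m ^^^ 2 ^ s) u else 0) =
              ∑ x ∈ Finset.range k,
                (if (m ^^^ 2 ^ s).testBit w = true ∧ e s w = true then
                  (if (m ^^^ 2 ^ u ^^^ 2 ^ s).testBit x = true ∧ e x u = true
                    then pvF e k w (m ^^^ 2 ^ u ^^^ 2 ^ s) x else 0) else 0) := by
            intro w _
            by_cases hg : (m ^^^ 2 ^ s).testBit w = true ∧ e s w = true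
            · simp only [if_pos hg]
              by_cases hwu : w = u
              · subst hwu
                have hm3ne : m ^^^ 2 ^ s ≠ 2 ^ w := by
                  intro h3
                  apply hcase
                  have hm' : m = 2 ^ w ^^^ 2 ^ s := by
                    rw [← h3]; exact (pv_xor_cancel m s).symm
                  rw [hm', Nat.xor_comm (2 ^ w) (2 ^ s), pv_xor_cancel]
                rw [pvF_diag e k w _ hm3u, if_neg hm3ne]
                symm
                apply Finset.sum_eq_zero
                intro x _
                split
                · exact pvF_zero_s e k w _ x hm2ub
                · rfl
              · rw [pvF_step e k w (m ^^^ 2 ^ s) u hm3u hg.1 (fun h => hwu h.symm), hm32]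
            · simp only [if_neg hg]
              symm
              exact Finset.sum_eq_zero (fun x _ => rfl)
          rw [Finset.sum_congr rfl hL, Finset.sum_congr rfl hR, Finset.sum_comm]
          apply Finset.sum_congr rfl
          intro w _
          apply Finset.sum_congr rfl
          intro x _
          by_cases hxs : x = s
          · have hT : pvF e k w (m ^^^ 2 ^ u ^^^ 2 ^ s) x = 0 := by
              rw [hxs]; exact pvF_zero_left e k w _ s hm2sb
            split_ifs <;> simp [hT]
          · by_cases hwu : w = u
            · have hT : ∀ y, pvF e k w (m ^^^ 2 ^ u ^^^ 2 ^ s) y = 0 := fun y => by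
                rw [hwu]; exact pvF_zero_s e k u _ y hm2ub
              split_ifs <;> simp [hT]
            · have hsx : s ≠ x := fun h => hxs h.symm
              have huw : u ≠ w := fun h => hwu h.symm
              have e1 : (m ^^^ 2 ^ u ^^^ 2 ^ s).testBit x = (m ^^^ 2 ^ u).testBit x := by
                simp [Nat.testBit_xor, Nat.testBit_two_pow, hsx]
              have e2 : (m ^^^ 2 ^ s).testBit w = (m ^^^ 2 ^ u ^^^ 2 ^ s).testBit w := by
                simp [Nat.testBit_xor, Nat.testBit_two_pow, huw]
              rw [e2, ← e1]
              split_ifs <;> rfl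
      · -- u not in the mask: both sides vanish
        have hmu' : m.testBit u = false := by simpa using hmu
        rw [pvF_zero_left e k s m u hmu']
        symm
        apply Finset.sum_eq_zero
        intro w _
        split
        · exact pvF_zero_left e k w (m ^^^ 2 ^ s) u
            (by simp [Nat.testBit_xor, hmu', Nat.testBit_two_pow, hsu])
        · rfl

-- DP state characterisation ------------------------------------------------

def pvG (e : Nat → Nat → Bool) (k : Nat) (M : Nat) (key : Nat × Nat) : Int :=
  if key.2 < k ∧ key.1 < 2 ^ k ∧ key.1.testBit key.2 = true ∧ key.1 ^^^ 2 ^ key.2 < M then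
    pvF e k 0 key.1 key.2
  else 0

def pvWAdd (e : Nat → Nat → Bool) (k mask : Nat) (v : Nat) (key : Nat × Nat) : Int :=
  if mask.testBit v = true ∧ mask.testBit key.2 = false ∧ key.2 < k ∧
      key.1 = mask ||| 2 ^ key.2 ∧ e v key.2 = true then
    pvF e k 0 mask v
  else 0

lemma pv_wloop (e : Nat → Nat → Bool) (mask v : Nat) (cnt : Int) :
    ∀ (ws : List Nat) (d : PySem.Dict (Nat × Nat) Int) (key : Nat × Nat),
      (ws.foldl (pvWStep e mask v cnt) d).getD key 0 =
        d.getD key 0 +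
          (if mask.testBit key.2 = false ∧ key.1 = mask ||| 2 ^ key.2 ∧ e v key.2 = true then
            (ws.count key.2 : Int) * cnt
          else 0) := by
  intro ws
  induction ws with
  | nil => intro d key; simp
  | cons w ws ih =>
    intro d key
    rw [List.foldl_cons, ih]
    have hstep : (pvWStep e mask v cnt d w).getD key 0 =
        d.getD key 0 +
          (if mask.testBit w = false ∧ key = (mask ||| 2 ^ w, w) ∧ e v w = true then cnt else 0) := by
      unfold pvWStep
      by_cases h1 : mask.testBit w
      · simp [h1]
      · simp only [h1, Bool.false_eq_true, if_false, reduceIte]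
        by_cases h2 : e v w = true
        · rw [if_pos h2, PySem.Dict.getD_insert]
          by_cases h3 : key = (mask ||| 2 ^ w, w) <;>
            simp [h1, h2, h3] <;> ring
        · simp [h1, h2]
    rw [hstep]
    rcases key with ⟨km, kv⟩
    by_cases hwk : w = kv
    · subst hwk
      rw [List.count_cons_self]
      by_cases hc : mask.testBit w = false ∧ km = mask ||| 2 ^ w ∧ e v w = true
      · have hkey : ((km, w) : Nat × Nat) = (mask ||| 2 ^ w, w) := by
          simp [Prod.ext_iff, hc.2.1]
        rw [if_pos hc, if_pos hc, if_pos ⟨hc.1, hkey, hc.2.2⟩]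
        push_cast; ring
      · have hA : ¬ (mask.testBit w = false ∧ ((km, w) : Nat × Nat) = (mask ||| 2 ^ w, w) ∧ e v w = true) := by
          rintro ⟨ha, hb, hd⟩
          have h2 : km = mask ||| 2 ^ w := by simpa [Prod.ext_iff] using hb
          exact hc ⟨ha, h2, hd⟩
        rw [if_neg hc, if_neg hc, if_neg hA]
        ring
    · have hA : ¬ (mask.testBit w = false ∧ (km, kv) = (mask ||| 2 ^ w, w) ∧ e v w = true) := by
        rintro ⟨-, hb, -⟩
        have h2 : kv = w := by simpa [Prod.ext_iff] using congrArg Prod.snd hb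
        exact hwk h2.symm
      rw [if_neg hA, List.count_cons_of_ne (by simpa [eq_comm] using hwk)]
      ring

lemma pv_vloop (e : Nat → Nat → Bool) (k mask : Nat) (hk : mask < 2 ^ k) :
    ∀ (vs : List Nat) (d : PySem.Dict (Nat × Nat) Int),
      (∀ u : Nat, d.getD (mask, u) 0 = pvG e k mask (mask, u)) →
      ∀ key : Nat × Nat,
        (vs.foldl (pvVStep e mask k) d).getD key 0 =
          d.getD key 0 + (vs.map (fun v => pvWAdd e k mask v key)).sum := by
  intro vs
  induction vs with
  | nil => intro d _ key; simp
  | cons v vs ih =>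
    intro d hread key
    have hstep : ∀ key' : Nat × Nat,
        (pvVStep e mask k d v).getD key' 0 = d.getD key' 0 + pvWAdd e k mask v key' := by
      intro key'
      unfold pvVStep
      by_cases h1 : mask.testBit v
      · -- v is in the mask; the read value is pvF e k 0 mask v
        have hvk : v < k := by
          by_contra hvk
          have : mask.testBit v = false :=
            Nat.testBit_lt_two_pow (lt_of_lt_of_le hk (Nat.pow_le_pow_right (by norm_num) (by omega)))
          simp [this] at h1
        have hG : d.getD (mask, v) 0 = pvF e k 0 mask v := by
          rw [hread v]
          unfold pvG
          rw [if_pos ⟨hvk, hk, h1, pv_xor_pow_lt mask v h1⟩]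
        cases hg : d.get? (mask, v) with
        | none =>
          have h0 : pvF e k 0 mask v = 0 := by
            rw [← hG]; exact PySem.Dict.getD_of_get?_eq_none d 0 hg
          simp only [h1, if_true, hg]
          unfold pvWAdd
          split <;> simp [h0]
        | some cnt =>
          have hcnt : cnt = pvF e k 0 mask v := by
            rw [← hG]; exact (PySem.Dict.getD_of_get?_eq_some d 0 hg).symm
          simp only [h1, if_true, hg]
          by_cases hz : cnt = 0
          · rw [if_pos hz]
            unfold pvWAdd
            split <;> simp [← hcnt, hz]
          · rw [if_neg hz, pv_wloop, List.count_range]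
            unfold pvWAdd
            rcases key' with ⟨km, kv⟩
            by_cases hc : mask.testBit kv = false ∧ km = mask ||| 2 ^ kv ∧ e v kv = true
            · rw [if_pos hc]
              by_cases hkv : kv < k
              · rw [if_pos hkv, if_pos ⟨h1, hc.1, hkv, hc.2.1, hc.2.2⟩, hcnt]; ring
              · rw [if_neg hkv, if_neg (by rintro ⟨-, -, h, -, -⟩; exact hkv h)]; ring
            · rw [if_neg hc, if_neg (by rintro ⟨-, ha, -, hb, hd⟩; exact hc ⟨ha, hb, hd⟩)]
      · simp only [h1, Bool.false_eq_true, if_false]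
        unfold pvWAdd
        rw [if_neg (by rintro ⟨ha, -⟩; simp [ha] at h1)]
        ring
    have hread' : ∀ u : Nat, (pvVStep e mask k d v).getD (mask, u) 0 = pvG e k mask (mask, u) := by
      intro u
      rw [hstep (mask, u), ← hread u]
      have : pvWAdd e k mask v (mask, u) = 0 := by
        unfold pvWAdd
        rw [if_neg]
        rintro ⟨-, hnb, -, hmeq, -⟩
        simp only at hnb hmeq
        have hbit := congrArg (fun x => x.testBit u) hmeq
        simp [Nat.testBit_or, Nat.testBit_two_pow, hnb] at hbit
      rw [this]; ring
    rw [List.foldl_cons, ih (pvVStep e mask k d v) hread' key, hstep key]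
    simp only [List.map_cons, List.sum_cons]
    ring

lemma pv_maskstep (e : Nat → Nat → Bool) (k mask : Nat) (h1 : 1 ≤ mask) (hk : mask < 2 ^ k)
    (d : PySem.Dict (Nat × Nat) Int)
    (hd : ∀ key : Nat × Nat, d.getD key 0 = pvG e k mask key) :
    ∀ key : Nat × Nat, (pvMaskStep e k d mask).getD key 0 = pvG e k (mask + 1) key := by
  intro key
  unfold pvMaskStep
  by_cases hb0 : mask.testBit 0
  · rw [if_pos hb0,
      pv_vloop e k mask hk (List.range k) d (fun u => hd (mask, u)) key, hd key]
    rcases key with ⟨m, w⟩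
    by_cases ht : w < k ∧ mask.testBit w = false ∧ m = mask ||| 2 ^ w
    · have hmw : m.testBit w = true := by
        rw [ht.2.2]; simp [Nat.testBit_or, Nat.testBit_two_pow]
      have hxor : m ^^^ 2 ^ w = mask := by
        rw [ht.2.2, pv_or_eq_xor mask w ht.2.1, pv_xor_cancel]
      have hm2k : m < 2 ^ k := by
        rw [ht.2.2]
        exact Nat.or_lt_two_pow hk (Nat.pow_lt_pow_right (by norm_num) ht.1)
      have hGm : pvG e k mask (m, w) = 0 := by
        unfold pvG; rw [if_neg]; rintro ⟨-, -, -, h4⟩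
        exact absurd (show m ^^^ 2 ^ w < mask from h4) (by omega)
      have hGm1 : pvG e k (mask + 1) (m, w) = pvF e k 0 m w := by
        unfold pvG; rw [if_pos ⟨ht.1, hm2k, hmw, show m ^^^ 2 ^ w < mask + 1 by omega⟩]
      rw [hGm, hGm1, zero_add]
      have hw0 : w ≠ 0 := by
        intro h; rw [h] at ht; rw [ht.2.1] at hb0; exact absurd hb0 (by simp)
      have hm0 : m.testBit 0 = true := by
        rw [ht.2.2, Nat.testBit_or, hb0, Bool.true_or]
      rw [pvF, dif_pos ⟨hmw, hm0⟩, if_neg hw0, hxor, pv_sum_range]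
      apply Finset.sum_congr rfl
      intro u _
      unfold pvWAdd
      by_cases hu : mask.testBit u = true ∧ e u w = true
      · rw [if_pos ⟨hu.1, ht.2.1, ht.1, ht.2.2, hu.2⟩, if_pos hu]
      · rw [if_neg (by rintro ⟨ha, -, -, -, hb2⟩; exact hu ⟨ha, hb2⟩), if_neg hu]
    · have hsum : ((List.range k).map (fun v => pvWAdd e k mask v (m, w))).sum = 0 := by
        apply List.sum_eq_zero
        intro x hx
        simp only [List.mem_map] at hx
        obtain ⟨v, -, rfl⟩ := hx
        unfold pvWAdd
        rw [if_neg]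
        rintro ⟨-, ha, hb2, hc2, -⟩
        simp only at ha hb2 hc2
        exact ht ⟨hb2, ha, hc2⟩
      rw [hsum, add_zero]
      unfold pvG
      by_cases hc : w < k ∧ m < 2 ^ k ∧ m.testBit w = true ∧ m ^^^ 2 ^ w < mask
      · rw [if_pos hc, if_pos ⟨hc.1, hc.2.1, hc.2.2.1, show m ^^^ 2 ^ w < mask + 1 by omega⟩]
      · rw [if_neg (by simpa using hc)]
        by_cases hc' : w < k ∧ m < 2 ^ k ∧ m.testBit w = true ∧ m ^^^ 2 ^ w < mask + 1
        · have h4 : ¬ (m ^^^ 2 ^ w < mask) := fun hlt =>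
            hc ⟨hc'.1, hc'.2.1, hc'.2.2.1, hlt⟩
          have hbnd : m ^^^ 2 ^ w = mask := by omega
          have hmaskw : mask.testBit w = false := by
            rw [← hbnd]; simp [Nat.testBit_xor, hc'.2.2.1, Nat.testBit_two_pow]
          have hmor : m = mask ||| 2 ^ w := by
            rw [pv_or_eq_xor mask w hmaskw, ← hbnd, pv_xor_cancel]
          exact absurd ⟨hc'.1, hmaskw, hmor⟩ ht
        · rw [if_neg (by simpa using hc')]
  · rw [if_neg hb0, hd key]
    rcases key with ⟨m, w⟩
    unfold pvG
    by_cases hc : w < k ∧ m < 2 ^ k ∧ m.testBit w = true ∧ m ^^^ 2 ^ w < mask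
    · rw [if_pos hc, if_pos ⟨hc.1, hc.2.1, hc.2.2.1, show m ^^^ 2 ^ w < mask + 1 by omega⟩]
    · rw [if_neg (by simpa using hc)]
      by_cases hc' : w < k ∧ m < 2 ^ k ∧ m.testBit w = true ∧ m ^^^ 2 ^ w < mask + 1
      · have h4 : ¬ (m ^^^ 2 ^ w < mask) := fun hlt => hc ⟨hc'.1, hc'.2.1, hc'.2.2.1, hlt⟩
        have hbnd : m ^^^ 2 ^ w = mask := by omega
        rw [if_pos (by simpa using hc')]
        by_cases hw : w = 0
        · subst hw
          rw [pvF, dif_pos ⟨hc'.2.2.1, hc'.2.2.1⟩, if_pos rfl, if_neg]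
          intro hm1
          have hm1' : m = 1 := by simpa using hm1
          rw [hm1'] at hbnd
          simp at hbnd
          omega
        · have hm0 : m.testBit 0 = false := by
            have hm : m = mask ^^^ 2 ^ w := by rw [← hbnd, pv_xor_cancel]
            have hmb : mask.testBit 0 = false := by simpa using hb0
            rw [hm, Nat.testBit_xor, hmb, Nat.testBit_two_pow]
            simp [hw]
          exact (pvF_zero_s e k 0 m w hm0).symm
      · rw [if_neg (by simpa using hc')]

lemma pv_dp_final (e : Nat → Nat → Bool) (k : Nat) (hk : 2 ≤ k) :
    ∀ key : Nat × Nat,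
      (((List.range' 1 (2 ^ k - 1)).foldl (pvMaskStep e k)
          (PySem.Dict.empty.insert (2 ^ 0, 0) 1)).getD key 0) = pvG e k (2 ^ k) key := by
  have hloop : ∀ n, n ≤ 2 ^ k - 1 → ∀ key : Nat × Nat,
      (((List.range' 1 n).foldl (pvMaskStep e k)
          (PySem.Dict.empty.insert (2 ^ 0, 0) 1)).getD key 0) = pvG e k (n + 1) key := by
    intro n
    induction n with
    | zero =>
      intro _ key
      rcases key with ⟨m, w⟩
      rw [List.range'_zero, List.foldl_nil, PySem.Dict.getD_insert]
      by_cases hkey : ((m, w) : Nat × Nat) = (2 ^ 0, 0)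
      · rw [if_pos hkey]
        obtain ⟨hm, hw⟩ : m = 2 ^ 0 ∧ w = 0 := by simpa [Prod.ext_iff] using hkey
        subst hm; subst hw
        unfold pvG
        rw [if_pos ⟨by omega, by simpa using Nat.one_lt_two_pow_iff.mpr (by omega),
          by decide, by decide⟩]
        rw [pvF, dif_pos ⟨by decide, by decide⟩, if_pos rfl, if_pos (by decide)]
      · rw [if_neg hkey, PySem.Dict.getD_empty]
        unfold pvG
        by_cases hcond : w < k ∧ m < 2 ^ k ∧ m.testBit w = true ∧ m ^^^ 2 ^ w < 0 + 1
        · have hm2 : m = 2 ^ w := by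
            have h0 : m ^^^ 2 ^ w = 0 := by
              have := hcond.2.2.2; omega
            exact Nat.xor_eq_zero.mp h0
          have hw0 : w ≠ 0 := by
            rintro rfl
            exact hkey (by simp [Prod.ext_iff, hm2])
          rw [if_pos hcond]
          refine (pvF_zero_s e k 0 m w ?_).symm
          rw [hm2, Nat.testBit_two_pow]
          simp [hw0]
        · rw [if_neg hcond]
    | succ n ih =>
      intro hn key
      rw [List.range'_concat, List.foldl_append, List.foldl_cons, List.foldl_nil,
        one_mul]
      have hstep := pv_maskstep e k (1 + n) (by omega)
        (by have : (1:Nat) ≤ 2 ^ k := Nat.one_le_two_pow; omega)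
        (((List.range' 1 n).foldl (pvMaskStep e k) (PySem.Dict.empty.insert (2 ^ 0, 0) 1)))
        (by
          intro key'
          rw [ih (by omega) key']
          congr 1
          omega)
      rw [hstep key]
      congr 1
      omega
  intro key
  rw [hloop (2 ^ k - 1) le_rfl key]
  congr 1
  have : (1:Nat) ≤ 2 ^ k := Nat.one_le_two_pow
  omega

-- DFS characterisation -----------------------------------------------------

def pvMask (S : List Nat) : Nat := S.foldr (fun x m => m ||| 2 ^ x) 0

lemma pvMask_testBit (S : List Nat) (i : Nat) : (pvMask S).testBit i = decide (i ∈ S) := by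
  induction S with
  | nil => simp [pvMask]
  | cons x S ih =>
      simp only [pvMask, List.foldr_cons, Nat.testBit_or, Nat.testBit_two_pow, List.mem_cons] at *
      rw [ih]
      by_cases h : x = i <;> simp [h, eq_comm] <;> tauto

lemma pv_dfs_nil (e : Nat → Nat → Bool) (k v : Nat) (hv : v < k) :
    pvDfs e v [] =
      ∑ u ∈ Finset.range k, (if e u 0 = true then pvF e k v (pvMask [v]) u else 0) := by
  rw [pvDfs]
  rw [if_pos (by simp)]
  have hm : pvMask [v] = 2 ^ v := by simp [pvMask]
  rw [hm]
  rw [Finset.sum_eq_single_of_mem v (Finset.mem_range.mpr hv)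
    (by
      intro b _ hb
      have hz : pvF e k v (2 ^ v) b = 0 := by
        apply pvF_zero_left
        rw [Nat.testBit_two_pow]
        exact decide_eq_false (fun h => hb h.symm)
      split <;> simp [hz])]
  have h1 : pvF e k v (2 ^ v) v = 1 := by
    rw [pvF_diag e k v _ (by simp [Nat.testBit_two_pow]), if_pos rfl]
  rw [h1]

lemma pv_dfs_eq (e : Nat → Nat → Bool) (k : Nat) :
    ∀ (S : List Nat) (v : Nat), S.Nodup → v < k → v ∉ S → (∀ x ∈ S, x < k) →
      pvDfs e v S =
        ∑ u ∈ Finset.range k,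
          (if e u 0 = true then pvF e k v (pvMask (v :: S)) u else 0) := by
  suffices H : ∀ (n : Nat) (S : List Nat) (v : Nat), S.length ≤ n → S.Nodup → v < k →
      v ∉ S → (∀ x ∈ S, x < k) →
      pvDfs e v S =
        ∑ u ∈ Finset.range k,
          (if e u 0 = true then pvF e k v (pvMask (v :: S)) u else 0) by
    intro S v h1 h2 h3 h4
    exact H S.length S v le_rfl h1 h2 h3 h4
  intro n
  induction n with
  | zero =>
    intro S v hlen _ hv _ _
    have hS : S = [] := List.eq_nil_of_length_eq_zero (by omega)
    subst hS
    exact pv_dfs_nil e k v hv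
  | succ n ihn =>
    intro S v hlen hnd hv hvS hSk
    rcases hS : S with _ | ⟨s0, S'⟩
    · exact pv_dfs_nil e k v hv
    · rw [← hS]
      have hSne : S ≠ [] := by rw [hS]; simp
      -- unfold one step of the recursion and turn the loop into a sum over S
      rw [pvDfs]
      rw [if_neg (by simp [hSne])]
      rw [List.foldl_attach
        (f := fun t w => if e v w = true then
          t + pvDfs e w (S.filter (fun x => decide (x ≠ w))) else t)]
      rw [PySem.List.foldl_congr_mem S _
        (fun t w => t + (if e v w = true then
          pvDfs e w (S.filter (fun x => decide (x ≠ w))) else 0)) 0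
        (by intro acc x _; by_cases hx : e v x = true <;> simp [hx])]
      rw [PySem.List.foldl_add, zero_add,
        ← List.sum_toFinset _ hnd]
      -- rewrite each recursive call with the induction hypothesis
      have hrec : ∀ w ∈ S.toFinset,
          (if e v w = true then pvDfs e w (S.filter (fun x => decide (x ≠ w))) else 0) =
          (if e v w = true then
            ∑ u ∈ Finset.range k,
              (if e u 0 = true then pvF e k w (pvMask S) u else 0) else 0) := by
        intro w hw
        have hwS : w ∈ S := List.mem_toFinset.mp hw
        by_cases he : e v w = true
        · rw [if_pos he, if_pos he]
          have hflt : (S.filter (fun x => decide (x ≠ w))).length < S.length :=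
            pv_filter_ne_lt S w hwS
          have hmaskS : pvMask (w :: S.filter (fun x => decide (x ≠ w))) = pvMask S := by
            apply Nat.eq_of_testBit_eq
            intro i
            rw [pvMask_testBit, pvMask_testBit]
            by_cases hiw : i = w
            · subst hiw; simp [hwS]
            · simp [List.mem_filter, hiw]
          rw [ihn (S.filter (fun x => decide (x ≠ w))) w (by omega)
            (hnd.filter _) (hSk w hwS) (by simp) (fun x hx => hSk x (List.mem_of_mem_filter hx)),
            hmaskS]
        · rw [if_neg he, if_neg he]
      rw [Finset.sum_congr rfl hrec]
      -- push the outer conditional into the inner sum and swap the two sums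
      have hpush : ∀ w ∈ S.toFinset,
          (if e v w = true then
            ∑ u ∈ Finset.range k,
              (if e u 0 = true then pvF e k w (pvMask S) u else 0) else 0) =
          ∑ u ∈ Finset.range k,
            (if e u 0 = true then
              (if (pvMask S).testBit w = true ∧ e v w = true then pvF e k w (pvMask S) u else 0)
              else 0) := by
        intro w hw
        have hwb : (pvMask S).testBit w = true := by
          rw [pvMask_testBit]; simp [List.mem_toFinset.mp hw]
        by_cases he : e v w = true
        · rw [if_pos he]
          apply Finset.sum_congr rfl
          intro u _
          by_cases he0 : e u 0 = true
          · rw [if_pos he0, if_pos he0, if_pos ⟨hwb, he⟩]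
          · rw [if_neg he0, if_neg he0]
        · rw [if_neg he]
          symm
          apply Finset.sum_eq_zero
          intro u _
          by_cases he0 : e u 0 = true
          · rw [if_pos he0, if_neg (by rintro ⟨-, h⟩; exact he h)]
          · rw [if_neg he0]
      rw [Finset.sum_congr rfl hpush, Finset.sum_comm]
      -- extend the w-sum from S to range k (missing terms vanish on the testBit guard)
      have hsub : S.toFinset ⊆ Finset.range k := by
        intro x hx
        exact Finset.mem_range.mpr (hSk x (List.mem_toFinset.mp hx))
      have hext : ∀ u ∈ Finset.range k,
          (∑ w ∈ S.toFinset,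
            (if e u 0 = true then
              (if (pvMask S).testBit w = true ∧ e v w = true then pvF e k w (pvMask S) u else 0)
              else 0)) =
          ∑ w ∈ Finset.range k,
            (if e u 0 = true then
              (if (pvMask S).testBit w = true ∧ e v w = true then pvF e k w (pvMask S) u else 0)
              else 0) := by
        intro u _
        apply Finset.sum_subset hsub
        intro w _ hwS
        have hnw : w ∉ S := fun h => hwS (List.mem_toFinset.mpr h)
        have hwb : (pvMask S).testBit w = false := by
          rw [pvMask_testBit]
          simp [hnw]
        by_cases he0 : e u 0 = true
        · rw [if_pos he0, if_neg (by rintro ⟨h, -⟩; rw [hwb] at h; exact Bool.false_ne_true h)]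
        · rw [if_neg he0]
      rw [Finset.sum_congr rfl hext]
      -- recognise the first-step expansion of pvF
      have hmv : (pvMask (v :: S)).testBit v = true := by
        rw [pvMask_testBit]; simp
      have hmne : pvMask (v :: S) ≠ 2 ^ v := by
        intro hEq
        have hs0 : s0 ∈ S := by rw [hS]; simp
        have h1 : (pvMask (v :: S)).testBit s0 = true := by
          rw [pvMask_testBit]; simp [hs0]
        have hvs0 : v ≠ s0 := fun h => hvS (h ▸ hs0)
        rw [hEq, Nat.testBit_two_pow] at h1
        simp [hvs0] at h1
      have hxorS : pvMask (v :: S) ^^^ 2 ^ v = pvMask S := by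
        apply Nat.eq_of_testBit_eq
        intro i
        rw [Nat.testBit_xor, pvMask_testBit, pvMask_testBit, Nat.testBit_two_pow]
        by_cases hiv : v = i
        · subst hiv; simp [hvS]
        · have hiv' : i ≠ v := fun h => hiv h.symm
          simp [hiv, hiv', List.mem_cons]
      apply Finset.sum_congr rfl
      intro u hu
      by_cases he0 : e u 0 = true
      · rw [if_pos he0]
        rw [pvF_first_step e k (pvMask (v :: S)) v u hv (Finset.mem_range.mp hu) hmv hmne,
          hxorS]
        apply Finset.sum_congr rfl
        intro w _
        rw [if_pos he0]
      · rw [if_neg he0]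
        apply Finset.sum_eq_zero
        intro w _
        rw [if_neg he0]

-- per-vertex-set equality of the two counts --------------------------------

lemma pv_count_eq (A : List (List Int)) (verts : List Int) (h2 : 2 ≤ verts.length) :
    count_ham_cycles A verts = pvCountAlt A verts := by
  unfold count_ham_cycles pvCountAlt
  by_cases hk3 : verts.length = 3
  · rw [if_pos hk3, if_pos hk3]
  · rw [if_neg hk3, if_neg hk3]
    have hk2 : 2 ≤ verts.length := h2
    set k := verts.length with hkdef
    set e := pvE A verts with hedef
    have h2k1 : (1:Nat) ≤ 2 ^ k := Nat.one_le_two_pow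
    have h2k4 : (4:Nat) ≤ 2 ^ k := by
      calc (4:Nat) = 2 ^ 2 := by norm_num
      _ ≤ 2 ^ k := Nat.pow_le_pow_right (by norm_num) hk2
    have hd := pv_dp_final e k hk2
    set d := (List.range' 1 (2 ^ k - 1)).foldl (pvMaskStep e k)
      (PySem.Dict.empty.insert (2 ^ 0, 0) 1) with hddef
    -- the final read-off loop is a sum of the pvF values
    have hcongr : ∀ (acc : Int), ∀ v ∈ List.range k,
        (if v = 0 then acc
          else match d.get? (2 ^ k - 1, v) with
            | none => acc
            | some x => if 0 < x then (if e v 0 then acc + x else acc) else acc) =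
        acc + (if e v 0 = true then pvF e k 0 (2 ^ k - 1) v else 0) := by
      intro acc v hvmem
      have hvk : v < k := List.mem_range.mp hvmem
      have hgetD : d.getD (2 ^ k - 1, v) 0 = pvF e k 0 (2 ^ k - 1) v := by
        rw [hd]
        unfold pvG
        rw [if_pos ⟨hvk, by omega, by simp [Nat.testBit_two_pow_sub_one, hvk],
          Nat.xor_lt_two_pow (by omega)
            (Nat.pow_lt_pow_right (by norm_num) hvk)⟩]
      by_cases hv0 : v = 0
      · subst hv0
        rw [if_pos rfl]
        have hF0 : pvF e k 0 (2 ^ k - 1) 0 = 0 := by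
          rw [pvF_diag e k 0 _ (by simp [Nat.testBit_two_pow_sub_one]; omega), if_neg]
          simp
          omega
        simp [hF0]
      · rw [if_neg hv0]
        cases hg : d.get? (2 ^ k - 1, v) with
        | none =>
          have hz : pvF e k 0 (2 ^ k - 1) v = 0 := by
            rw [← hgetD]
            exact PySem.Dict.getD_of_get?_eq_none d 0 hg
          simp [hz]
        | some x =>
          have hx : x = pvF e k 0 (2 ^ k - 1) v := by
            rw [← hgetD]
            exact (PySem.Dict.getD_of_get?_eq_some d 0 hg).symm
          dsimp only
          by_cases hpos : 0 < x
          · rw [if_pos hpos]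
            by_cases he : e v 0 = true
            · rw [if_pos he, if_pos he, hx]
            · rw [if_neg he, if_neg he]
              ring
          · rw [if_neg hpos]
            have hx0 : x = 0 := le_antisymm (by omega) (hx ▸ pvF_nonneg e k 0 _ _)
            rw [← hx, hx0]
            simp
    rw [PySem.List.foldl_congr_mem (List.range k) _
      (fun t v => t + (if e v 0 = true then pvF e k 0 (2 ^ k - 1) v else 0)) 0 hcongr,
      PySem.List.foldl_add, zero_add, pv_sum_range]
    -- the DFS side
    have hmask : pvMask (0 :: List.range' 1 (k - 1)) = 2 ^ k - 1 := by
      apply Nat.eq_of_testBit_eq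
      intro i
      rw [pvMask_testBit, Nat.testBit_two_pow_sub_one]
      simp only [List.mem_cons, List.mem_range'_1]
      by_cases hik : i < k <;> simp [hik] <;> omega
    rw [pv_dfs_eq e k (List.range' 1 (k - 1)) 0 (List.nodup_range')
      (by omega) (by simp [List.mem_range'_1]) (fun x hx => by
        rw [List.mem_range'_1] at hx; omega), hmask]

-- enumerate level -----------------------------------------------------------

theorem pv_main (A : List (List Int)) (p : Int) :
    enumerate_directed_cycles A p = enumerate_directed_cycles_alt A p := by
  unfold enumerate_directed_cycles enumerate_directed_cycles_alt
  apply PySem.List.foldl_congr_mem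
  intro acc k hkmem
  apply PySem.List.foldl_congr_mem
  intro acc2 subset hsub
  have hk3 : (3 : Int) ≤ k :=
    ((PySem.List.mem_pyRange_iff_of_pos (by norm_num) k).mp hkmem).1
  have hlen : subset.length = k.toNat := PySem.List.length_of_mem_combinations hsub
  have h2 : 2 ≤ subset.length := by omega
  rw [pv_count_eq A subset h2]

-- ===== VERDICT (by name: the statement is the Claim_ definition above) =====
theorem enumerate_directed_cycles_spec : Claim_equal_enumerate_directed_cycles := by
  intro A p _ _
  unfold Spec_enumerate_directed_cycles
  exact pv_main A p
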